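-- pv_equiv track=rewrite | github.com/Binkmaster/cuneiform | cuneiform/core/smooth.py | extract_smooth_part
-- ===== SOURCE A (Python) =====
-- def extract_smooth_part(n: int) -> tuple[int, int]:
--     """Factor n into (smooth_part, cofactor) where smooth_part is the largest
--     5-smooth divisor and cofactor has no factors of 2, 3, or 5.
--     n = smooth_part * cofactor."""
--     if n <= 0:
--         raise ValueError(f"extract_smooth_part requires positive integer, got {n}")
--     cofactor = n
--     for p in (2, 3, 5):
--         while cofactor % p == 0:
--             cofactor //= p
--     smooth_part = n // cofactor
--     return (smooth_part, cofactor)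
-- ===== SOURCE B (Python) =====
-- def _gcd(a, b):
--     while b:
--         a, b = b, a % b
--     return a
--
--
-- def extract_smooth_part(n: int) -> tuple[int, int]:
--     """Factor n into (smooth_part, cofactor) where smooth_part is the largest
--     5-smooth divisor and cofactor has no factors of 2, 3, or 5."""
--     if n <= 0:
--         raise ValueError(f"extract_smooth_part requires positive integer, got {n}")
--     r = n
--     while True:
--         g = _gcd(r, 30)
--         if g == 1:
--             break
--         r //= g
--     return (n // r, r)
-- ===== Notes on version B (the rewrite author's own statement) =====
-- stated objective: alternative
-- what changed: Replaces the three nested per-prime division loops with a single round-based loop that repeatedly divides the cofactor by its gcd with the product of the small primes two, three and five until they are coprime, stripping one factor of each remaining small prime per round.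
import Mathlib
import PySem

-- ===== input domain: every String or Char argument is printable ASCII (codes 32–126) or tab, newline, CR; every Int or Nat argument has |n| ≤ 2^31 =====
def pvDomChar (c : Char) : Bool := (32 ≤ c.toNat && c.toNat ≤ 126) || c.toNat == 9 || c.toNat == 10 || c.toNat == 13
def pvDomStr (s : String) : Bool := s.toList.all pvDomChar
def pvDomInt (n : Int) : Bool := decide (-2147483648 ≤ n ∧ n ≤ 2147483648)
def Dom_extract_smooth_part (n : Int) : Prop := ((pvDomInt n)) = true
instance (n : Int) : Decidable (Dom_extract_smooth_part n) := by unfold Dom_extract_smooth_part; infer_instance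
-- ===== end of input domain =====

-- B replaces A's three per-prime while-loops by one round-based loop dividing by gcd(r, 30)
-- until r has no small-prime factor left (objective: alternative; same asymptotic cost).

-- ===== PORT A =====
-- 'while cofactor % p == 0: cofactor //= p', fuel-bounded for totality (fuel n.natAbs suffices on Pre_)
def pvDivOut (fuel : Nat) (p c : Int) : Int :=
  match fuel with
  | 0 => c
  | f + 1 => if PySem.Int.mod c p = 0 then pvDivOut f p (PySem.Int.floordiv c p) else c

def extract_smooth_part (n : Int) : Int × Int :=
  let c1 := pvDivOut n.natAbs 2 n
  let c2 := pvDivOut n.natAbs 3 c1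
  let c3 := pvDivOut n.natAbs 5 c2
  (PySem.Int.floordiv n c3, c3)

-- ===== PORT B =====
-- '_gcd(a, b): while b: a, b = b, a % b', fuel-bounded; fuel 31 suffices since b = 30 at every call site
def pvGcdB (fuel : Nat) (a b : Int) : Int :=
  match fuel with
  | 0 => a
  | f + 1 => if b ≠ 0 then pvGcdB f b (PySem.Int.mod a b) else a

-- 'while True: g = _gcd(r, 30); if g == 1: break; r //= g'
def pvGcdLoopB (fuel : Nat) (r : Int) : Int :=
  match fuel with
  | 0 => r
  | f + 1 =>
    let g := pvGcdB 31 r 30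
    if g = 1 then r else pvGcdLoopB f (PySem.Int.floordiv r g)

def extract_smooth_part_alt (n : Int) : Int × Int :=
  let r := pvGcdLoopB n.natAbs n
  (PySem.Int.floordiv n r, r)

-- ===== PRECONDITION & SPEC =====
-- A raises ValueError exactly when n <= 0.
def Pre_extract_smooth_part (n : Int) : Prop := 0 < n
instance (n : Int) : Decidable (Pre_extract_smooth_part n) := by unfold Pre_extract_smooth_part; infer_instance
def pvWitness_extract_smooth_part : Int := 12

def Spec_extract_smooth_part (n : Int) (out : Int × Int) : Prop := out = extract_smooth_part_alt n
instance (n : Int) (out : Int × Int) : Decidable (Spec_extract_smooth_part n out) := by unfold Spec_extract_smooth_part; infer_instance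

-- ===== CLAIM =====
def Claim_equal_extract_smooth_part : Prop :=
  ∀ (n : Int), Dom_extract_smooth_part n → Pre_extract_smooth_part n →
    Spec_extract_smooth_part n (extract_smooth_part n)

-- ===== LEMMAS AND PROOFS =====

-- Nat models of the two loops
def stripN (p : Nat) : Nat → Nat → Nat
  | 0, c => c
  | f + 1, c => if c % p = 0 then stripN p f (c / p) else c

def gcdLoopN : Nat → Nat → Nat
  | 0, r => r
  | f + 1, r => if Nat.gcd r 30 = 1 then r else gcdLoopN f (r / Nat.gcd r 30)

-- bridges: on positive inputs the Int ports compute the Nat models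
theorem pvDivOut_cast (p : Nat) (hp : 0 < p) :
    ∀ (f c : Nat), 0 < c → pvDivOut f (↑p) (↑c) = ↑(stripN p f c) := by
  intro f
  induction f with
  | zero => intro c _; rfl
  | succ f ih =>
    intro c hc
    have hm : PySem.Int.mod (↑c) (↑p) = ((c % p : Nat) : Int) := PySem.Int.mod_natCast c p
    have hd : PySem.Int.floordiv (↑c) (↑p) = ((c / p : Nat) : Int) := PySem.Int.floordiv_natCast c p
    show (if PySem.Int.mod (↑c) (↑p) = 0 then pvDivOut f (↑p) (PySem.Int.floordiv (↑c) (↑p)) else (↑c : Int))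
        = ↑(if c % p = 0 then stripN p f (c / p) else c)
    rw [hm, hd]
    by_cases h : c % p = 0
    · have hdvd : p ∣ c := Nat.dvd_of_mod_eq_zero h
      have hpos : 0 < c / p := Nat.div_pos (Nat.le_of_dvd hc hdvd) hp
      rw [if_pos (by exact_mod_cast h), if_pos h]
      exact ih _ hpos
    · rw [if_neg (by exact_mod_cast h), if_neg h]

theorem pvGcdB_cast : ∀ (f a b : Nat), b < f → pvGcdB f (↑a) (↑b) = ↑(Nat.gcd a b) := by
  intro f
  induction f with
  | zero => intro a b h; omega
  | succ f ih =>
    intro a b h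
    by_cases hb : b = 0
    · subst hb; simp [pvGcdB]
    · have hb' : 0 < b := Nat.pos_of_ne_zero hb
      have hm : PySem.Int.mod (↑a) (↑b) = ((a % b : Nat) : Int) := PySem.Int.mod_natCast a b
      have hlt : a % b < f := lt_of_lt_of_le (Nat.mod_lt a hb') (by omega)
      show (if (↑b : Int) ≠ 0 then pvGcdB f (↑b) (PySem.Int.mod (↑a) (↑b)) else (↑a : Int)) = ↑(Nat.gcd a b)
      rw [if_pos (by exact_mod_cast hb), hm, ih b (a % b) hlt,
        Nat.gcd_comm b (a % b), ← Nat.gcd_rec b a, Nat.gcd_comm b a]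

theorem pvGcdLoopB_cast : ∀ (f r : Nat), 0 < r → pvGcdLoopB f (↑r) = ↑(gcdLoopN f r) := by
  intro f
  induction f with
  | zero => intro r _; rfl
  | succ f ih =>
    intro r hr
    have hg : pvGcdB 31 (↑r) 30 = ↑(Nat.gcd r 30) := by
      have h30 : ((30 : Int)) = ((30 : Nat) : Int) := by norm_num
      rw [h30]; exact pvGcdB_cast 31 r 30 (by norm_num)
    show (if pvGcdB 31 (↑r) 30 = 1 then (↑r : Int) else pvGcdLoopB f (PySem.Int.floordiv (↑r) (pvGcdB 31 (↑r) 30)))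
        = ↑(if Nat.gcd r 30 = 1 then r else gcdLoopN f (r / Nat.gcd r 30))
    rw [hg]
    by_cases h1 : Nat.gcd r 30 = 1
    · rw [if_pos (by exact_mod_cast h1), if_pos h1]
    · have hgpos : 0 < Nat.gcd r 30 := Nat.gcd_pos_of_pos_right r (by norm_num)
      have hgdvd : Nat.gcd r 30 ∣ r := Nat.gcd_dvd_left r 30
      have hd : PySem.Int.floordiv (↑r) (↑(Nat.gcd r 30)) = ((r / Nat.gcd r 30 : Nat) : Int) :=
        PySem.Int.floordiv_natCast r (Nat.gcd r 30)
      have hpos : 0 < r / Nat.gcd r 30 := Nat.div_pos (Nat.le_of_dvd hr hgdvd) hgpos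
      rw [if_neg (by exact_mod_cast h1), if_neg h1, hd, ih _ hpos]

-- quotient factors built only from divisors of 30
def SmoothMul (s : Nat) : Prop := ∀ q, Nat.Prime q → q ∣ s → q ∣ 30

theorem stripN_spec (p : Nat) (hp : 1 < p) :
    ∀ (f c : Nat), 0 < c → c ≤ f →
      ∃ k, c = stripN p f c * p ^ k ∧ ¬ p ∣ stripN p f c ∧ 0 < stripN p f c := by
  intro f
  induction f with
  | zero => intro c hc hle; omega
  | succ f ih =>
    intro c hc hle
    by_cases h : c % p = 0
    · have hdvd : p ∣ c := Nat.dvd_of_mod_eq_zero h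
      have hple : p ≤ c := Nat.le_of_dvd hc hdvd
      have hpos : 0 < c / p := Nat.div_pos hple (by omega)
      have hlt : c / p < c := Nat.div_lt_self hc hp
      obtain ⟨k, hk, hnd, hP⟩ := ih (c / p) hpos (by omega)
      have hstep : stripN p (f + 1) c = stripN p f (c / p) := by
        simp only [stripN, if_pos h]
      refine ⟨k + 1, ?_, ?_, ?_⟩
      · rw [hstep]
        have hcp : c / p * p = c := Nat.div_mul_cancel hdvd
        calc c = c / p * p := hcp.symm
          _ = stripN p f (c / p) * p ^ k * p := by rw [← hk]
          _ = stripN p f (c / p) * p ^ (k + 1) := by ring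
      · rw [hstep]; exact hnd
      · rw [hstep]; exact hP
    · have hstep : stripN p (f + 1) c = c := by simp only [stripN, if_neg h]
      refine ⟨0, by rw [hstep]; ring, ?_, by rw [hstep]; exact hc⟩
      rw [hstep]
      intro hdvd
      exact h (Nat.mod_eq_zero_of_dvd hdvd)

theorem gcdLoopN_spec :
    ∀ (f r : Nat), 0 < r → r ≤ f →
      ∃ s, r = gcdLoopN f r * s ∧ SmoothMul s ∧ 0 < gcdLoopN f r ∧
        Nat.Coprime (gcdLoopN f r) 30 := by
  intro f
  induction f with
  | zero => intro r hr hle; omega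
  | succ f ih =>
    intro r hr hle
    by_cases h1 : Nat.gcd r 30 = 1
    · have hstep : gcdLoopN (f + 1) r = r := by simp only [gcdLoopN, if_pos h1]
      exact ⟨1, by rw [hstep]; ring,
        fun q hq hd => absurd (Nat.dvd_one.mp hd) hq.ne_one,
        by rw [hstep]; exact hr, by rw [hstep]; exact h1⟩
    · have hgpos : 0 < Nat.gcd r 30 := Nat.gcd_pos_of_pos_right r (by norm_num)
      have hg2 : 1 < Nat.gcd r 30 := by omega
      have hgdvd : Nat.gcd r 30 ∣ r := Nat.gcd_dvd_left r 30
      have hg30 : Nat.gcd r 30 ∣ 30 := Nat.gcd_dvd_right r 30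
      have hpos : 0 < r / Nat.gcd r 30 := Nat.div_pos (Nat.le_of_dvd hr hgdvd) hgpos
      have hlt : r / Nat.gcd r 30 < r := Nat.div_lt_self hr hg2
      obtain ⟨s, hs, hsm, hP, hC⟩ := ih (r / Nat.gcd r 30) hpos (by omega)
      have hstep : gcdLoopN (f + 1) r = gcdLoopN f (r / Nat.gcd r 30) := by
        simp only [gcdLoopN, if_neg h1]
      refine ⟨s * Nat.gcd r 30, ?_, ?_, by rw [hstep]; exact hP, by rw [hstep]; exact hC⟩
      · rw [hstep]
        have hcp : r / Nat.gcd r 30 * Nat.gcd r 30 = r := Nat.div_mul_cancel hgdvd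
        calc r = r / Nat.gcd r 30 * Nat.gcd r 30 := hcp.symm
          _ = gcdLoopN f (r / Nat.gcd r 30) * s * Nat.gcd r 30 := by rw [← hs]
          _ = gcdLoopN f (r / Nat.gcd r 30) * (s * Nat.gcd r 30) := by ring
      · intro q hq hd
        rcases (Nat.Prime.dvd_mul hq).1 hd with h | h
        · exact hsm q hq h
        · exact dvd_trans h hg30

-- uniqueness of the positive 30-coprime cofactor with 5-smooth complement
theorem aux_unique {n r r' : Nat}
    (h : ∃ s, n = r * s ∧ SmoothMul s ∧ 0 < r ∧ Nat.Coprime r 30)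
    (h' : ∃ s, n = r' * s ∧ SmoothMul s ∧ 0 < r' ∧ Nat.Coprime r' 30) : r = r' := by
  obtain ⟨s, hn, hsm, hr, hc⟩ := h
  obtain ⟨s', hn', hsm', hr', hc'⟩ := h'
  have cop : ∀ (a sb : Nat), Nat.Coprime a 30 → SmoothMul sb → Nat.Coprime a sb := by
    intro a sb hca hsb
    by_contra hnc
    obtain ⟨q, hq, hqa, hqs⟩ := Nat.Prime.not_coprime_iff_dvd.1 hnc
    have hgq : q ∣ Nat.gcd a 30 := Nat.dvd_gcd hqa (hsb q hq hqs)
    have h1 : Nat.gcd a 30 = 1 := hca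
    rw [h1] at hgq
    exact hq.ne_one (Nat.dvd_one.mp hgq)
  have d1 : r ∣ r' := by
    have hrn : r ∣ n := ⟨s, hn⟩
    rw [hn'] at hrn
    exact (cop r s' hc hsm').dvd_of_dvd_mul_right hrn
  have d2 : r' ∣ r := by
    have hrn : r' ∣ n := ⟨s', hn'⟩
    rw [hn] at hrn
    exact (cop r' s hc' hsm).dvd_of_dvd_mul_right hrn
  exact Nat.dvd_antisymm d1 d2

theorem smooth_pow_dvd30 {p : Nat} (hp30 : p ∣ 30) {k q : Nat} (hq : Nat.Prime q)
    (h : q ∣ p ^ k) : q ∣ 30 :=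
  dvd_trans (Nat.Prime.dvd_of_dvd_pow hq h) hp30

-- the two cofactors agree on every positive Nat
theorem cofactor_eq (N : Nat) (hN : 0 < N) :
    stripN 5 N (stripN 3 N (stripN 2 N N)) = gcdLoopN N N := by
  obtain ⟨a, h1, hnd2, hp1⟩ := stripN_spec 2 (by norm_num) N N hN le_rfl
  set c1 := stripN 2 N N with hc1
  have hc1le : c1 ≤ N := Nat.le_of_dvd hN ⟨2 ^ a, h1⟩
  obtain ⟨b, h2, hnd3, hp2⟩ := stripN_spec 3 (by norm_num) N c1 hp1 hc1le
  set c2 := stripN 3 N c1 with hc2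
  have hc2le : c2 ≤ N := le_trans (Nat.le_of_dvd hp1 ⟨3 ^ b, h2⟩) hc1le
  obtain ⟨e, h3, hnd5, hp3⟩ := stripN_spec 5 (by norm_num) N c2 hp2 hc2le
  set c3 := stripN 5 N c2 with hc3
  have hd32 : c3 ∣ c1 := dvd_trans ⟨5 ^ e, h3⟩ ⟨3 ^ b, h2⟩
  have hnd2' : ¬ 2 ∣ c3 := fun hd => hnd2 (dvd_trans hd hd32)
  have hnd3' : ¬ 3 ∣ c3 := fun hd => hnd3 (dvd_trans hd ⟨5 ^ e, h3⟩)
  have hcop : Nat.Coprime c3 30 := by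
    have h30 : (30 : Nat) = 2 * (3 * 5) := by norm_num
    rw [h30]
    exact Nat.Coprime.mul_right
      (Nat.coprime_comm.mp ((Nat.Prime.coprime_iff_not_dvd Nat.prime_two).mpr hnd2'))
      (Nat.Coprime.mul_right
        (Nat.coprime_comm.mp ((Nat.Prime.coprime_iff_not_dvd Nat.prime_three).mpr hnd3'))
        (Nat.coprime_comm.mp ((Nat.Prime.coprime_iff_not_dvd (by norm_num)).mpr hnd5)))
  have auxA : ∃ s, N = c3 * s ∧ SmoothMul s ∧ 0 < c3 ∧ Nat.Coprime c3 30 := by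
    refine ⟨5 ^ e * (3 ^ b * 2 ^ a), ?_, ?_, hp3, hcop⟩
    · calc N = c1 * 2 ^ a := h1
        _ = c2 * 3 ^ b * 2 ^ a := by rw [← h2]
        _ = c3 * 5 ^ e * 3 ^ b * 2 ^ a := by rw [← h3]
        _ = c3 * (5 ^ e * (3 ^ b * 2 ^ a)) := by ring
    · intro q hq hd
      rcases (Nat.Prime.dvd_mul hq).1 hd with h | h
      · exact smooth_pow_dvd30 (by norm_num) hq h
      · rcases (Nat.Prime.dvd_mul hq).1 h with h | h
        · exact smooth_pow_dvd30 (by norm_num) hq h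
        · exact smooth_pow_dvd30 (by norm_num) hq h
  obtain ⟨s, hs, hsm, hP, hC⟩ := gcdLoopN_spec N N hN le_rfl
  exact aux_unique auxA ⟨s, hs, hsm, hP, hC⟩

-- ===== VERDICT =====
theorem extract_smooth_part_spec : Claim_equal_extract_smooth_part := by
  intro n _ hpre
  unfold Spec_extract_smooth_part extract_smooth_part extract_smooth_part_alt
  have hpos : (0 : Int) < n := hpre
  set N := n.toNat with hNdef
  have hn : n = (↑N : Int) := (Int.toNat_of_nonneg (le_of_lt hpos)).symm
  have hNpos : 0 < N := by omega
  have hna : n.natAbs = N := by omega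
  -- A side bridge
  obtain ⟨a, h1, _, hp1⟩ := stripN_spec 2 (by norm_num) N N hNpos le_rfl
  have hc1le : stripN 2 N N ≤ N := Nat.le_of_dvd hNpos ⟨2 ^ a, h1⟩
  obtain ⟨b, h2, _, hp2⟩ := stripN_spec 3 (by norm_num) N (stripN 2 N N) hp1 hc1le
  have e2 : pvDivOut N 2 n = ↑(stripN 2 N N) := by
    rw [hn, (by norm_num : (2 : Int) = ((2 : Nat) : Int))]
    exact pvDivOut_cast 2 (by norm_num) N N hNpos
  have e3 : pvDivOut N 3 (↑(stripN 2 N N)) = ↑(stripN 3 N (stripN 2 N N)) := by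
    rw [(by norm_num : (3 : Int) = ((3 : Nat) : Int))]
    exact pvDivOut_cast 3 (by norm_num) N _ hp1
  have e5 : pvDivOut N 5 (↑(stripN 3 N (stripN 2 N N))) = ↑(stripN 5 N (stripN 3 N (stripN 2 N N))) := by
    rw [(by norm_num : (5 : Int) = ((5 : Nat) : Int))]
    exact pvDivOut_cast 5 (by norm_num) N _ hp2
  -- B side bridge
  have eB : pvGcdLoopB N n = ↑(gcdLoopN N N) := by
    rw [hn]; exact pvGcdLoopB_cast N N hNpos
  simp only [hna, e2, e3, e5, eB, cofactor_eq N hNpos]
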